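-- pv_equiv track=rewrite | github.com/Kaduka123/astrazeneca-project-2025 | cho_analysis/task2/sequence_analysis.py | _simple_structure_prediction
-- ===== SOURCE A (Python) =====
-- def _simple_structure_prediction(sequence: str) -> str:
--     """Simple RNA secondary structure prediction (fallback method).
--
--     This is a very simplified model and should only be used when ViennaRNA is not available.
--
--     Args:
--         sequence: RNA sequence
--
--     Returns:
--         Dot-bracket notation of predicted structure
--     """
--     # Convert to uppercase and ensure it's RNA
--     sequence = sequence.upper().replace("T", "U")
--     n = len(sequence)
--
--     # Initialize structure with unpaired bases
--     structure = ["." for _ in range(n)]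
--
--     # Simple stack to track opening brackets
--     stack = []
--
--     # Simple complementary base pairs
--     complementary = {"A": "U", "U": "A", "G": "C", "C": "G"}
--
--     # Minimum loop size
--     min_loop_size = 3
--
--     # Scan for potential base pairs
--     for i in range(n):
--         if i + min_loop_size + 1 < n:  # Ensure there's enough space for a minimal loop
--             for j in range(n - 1, i + min_loop_size, -1):
--                 # Check if bases can pair
--                 if sequence[i] in complementary and sequence[j] == complementary[sequence[i]]:
--                     # Check if both positions are unpaired
--                     if structure[i] == "." and structure[j] == ".":
--                         # Mark as paired
--                         structure[i] = "("
--                         structure[j] = ")"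
--                         break
--
--     return "".join(structure)
-- ===== SOURCE B (Python) =====
-- def _simple_structure_prediction(sequence: str) -> str:
--     """Same greedy dot-bracket prediction, but O(n): per-base stacks of
--     unpaired positions; the largest eligible complement is found at the top
--     of a stack (lazily discarding already-paired entries) instead of by an
--     inner scan."""
--     seq = sequence.upper().replace("T", "U")
--     n = len(seq)
--     complementary = {"A": "U", "U": "A", "G": "C", "C": "G"}
--     min_loop_size = 3
--
--     # ascending positions of each base; the end of the list holds the largest
--     pos = {"A": [], "U": [], "G": [], "C": []}
--     for k, c in enumerate(seq):
--         if c in pos: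
--             pos[c].append(k)
--
--     structure = ["."] * n
--     for i in range(n):
--         if i + min_loop_size + 1 >= n:
--             continue
--         if structure[i] != "." or seq[i] not in complementary:
--             continue
--         lst = pos[complementary[seq[i]]]
--         # lazily drop positions that were paired meanwhile
--         while lst and structure[lst[-1]] != ".":
--             lst.pop()
--         if lst and lst[-1] > i + min_loop_size:
--             j = lst.pop()
--             structure[i] = "("
--             structure[j] = ")"
--     return "".join(structure)
-- ===== Notes on version B (the rewrite author's own statement) =====
-- stated objective: faster
-- what changed: Replaces A's inner descending scan over all j with per-base stacks of unpaired positions built once: the largest eligible complementary partner is read off the top of a stack (lazily popping positions paired meanwhile), so the quadratic inner loop disappears.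
import Mathlib
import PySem

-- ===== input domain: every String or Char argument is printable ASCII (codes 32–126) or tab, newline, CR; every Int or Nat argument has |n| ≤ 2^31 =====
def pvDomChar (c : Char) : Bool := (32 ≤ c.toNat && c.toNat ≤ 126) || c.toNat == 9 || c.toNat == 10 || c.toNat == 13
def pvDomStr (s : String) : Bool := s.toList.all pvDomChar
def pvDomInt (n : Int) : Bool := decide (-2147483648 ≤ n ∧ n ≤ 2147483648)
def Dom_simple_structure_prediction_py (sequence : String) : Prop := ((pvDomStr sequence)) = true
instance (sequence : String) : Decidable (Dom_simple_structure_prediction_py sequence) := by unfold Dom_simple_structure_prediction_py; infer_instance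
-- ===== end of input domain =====

-- B replaces A's quadratic inner scan by per-base stacks of unpaired positions (largest on top,
-- already-paired entries popped lazily); objective: faster (asymptotic, O(n^2) → O(n)).

-- ===== PORT A =====
-- the dict `complementary` (shared constant table of both Pythons)
def pvComp : PySem.Dict Char Char := PySem.Dict.ofList [('A','U'),('U','A'),('G','C'),('C','G')]

-- A's inner `for j in range(n-1, i+3, -1)` with its `break`
def pvScanA (cs : List Char) (i : Int) (st : List Char) : List Int → List Char
  | [] => st
  | j :: js =>
      if (pvComp.contains (PySem.List.pyGetD cs i ' ')
            && (PySem.List.pyGetD cs j ' ' == pvComp.getD (PySem.List.pyGetD cs i ' ') ' '))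
          && (PySem.List.pyGetD st i '.' == '.' && PySem.List.pyGetD st j '.' == '.') then
        PySem.List.pySetD (PySem.List.pySetD st i '(') j ')'
      else pvScanA cs i st js

-- A's outer loop body
def pvStepA (cs : List Char) (st : List Char) (i : Int) : List Char :=
  if i + 3 + 1 < (cs.length : Int) then
    pvScanA cs i st (PySem.List.pyRange ((cs.length : Int) - 1) (i + 3) (-1))
  else st

def simple_structure_prediction_py (sequence : String) : String :=
  let cs := (PySem.Str.replace (PySem.Str.upper sequence) "T" "U").toList
  let st := (PySem.List.pyRange 0 (cs.length : Int) 1).foldl (pvStepA cs)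
      (List.replicate cs.length '.')
  String.mk st

-- ===== PORT B =====
-- B's `while lst and structure[lst[-1]] != ".": lst.pop()`; pos lists are stored head-first
-- (the Lean head is the Python list's LAST element, i.e. the largest position)
def pvPop (st : List Char) : List Int → List Int
  | [] => []
  | j :: rest =>
      if !(PySem.List.pyGetD st j '.' == '.') then pvPop st rest else j :: rest

-- B's `for k, c in enumerate(seq): if c in pos: pos[c].append(k)` (append = prepend head-first)
def pvPos (cs : List Char) : PySem.Dict Char (List Int) :=
  (PySem.List.enumerate cs 0).foldl
    (fun d kc => if d.contains kc.2 then d.modify kc.2 [] (fun l => kc.1 :: l) else d)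
    (PySem.Dict.ofList [('A',[]),('U',[]),('G',[]),('C',[])])

-- B's outer loop body (state: structure list × pos dict)
def pvStepB (cs : List Char) (sp : List Char × PySem.Dict Char (List Int)) (i : Int) :
    List Char × PySem.Dict Char (List Int) :=
  if i + 3 + 1 ≥ (cs.length : Int) then sp
  else if !(PySem.List.pyGetD sp.1 i '.' == '.') then sp
  else
    match pvComp.get? (PySem.List.pyGetD cs i ' ') with
    | none => sp
    | some c =>
        match pvPop sp.1 (sp.2.getD c []) with
        | [] => (sp.1, sp.2.insert c [])
        | j :: rest =>
            if j > i + 3 then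
              (PySem.List.pySetD (PySem.List.pySetD sp.1 i '(') j ')', sp.2.insert c rest)
            else (sp.1, sp.2.insert c (j :: rest))

def simple_structure_prediction_py_alt (sequence : String) : String :=
  let cs := (PySem.Str.replace (PySem.Str.upper sequence) "T" "U").toList
  let res := (PySem.List.pyRange 0 (cs.length : Int) 1).foldl (pvStepB cs)
      (List.replicate cs.length '.', pvPos cs)
  String.mk res.1

-- ===== PRECONDITION & SPEC =====
def Spec_simple_structure_prediction_py (sequence : String) (out : String) : Prop := out = simple_structure_prediction_py_alt sequence
instance (sequence : String) (out : String) : Decidable (Spec_simple_structure_prediction_py sequence out) := by unfold Spec_simple_structure_prediction_py; infer_instance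

-- ===== CLAIM (what is proved, stated in full; the proofs are below) =====
def Claim_equal_simple_structure_prediction_py : Prop := ∀ (sequence : String), Dom_simple_structure_prediction_py sequence → Spec_simple_structure_prediction_py sequence (simple_structure_prediction_py sequence)

-- ===== LEMMAS AND PROOFS =====

-- a pos list is valid for base c: strictly descending, in range with character c,
-- and it contains every still-unpaired position of c
def pvGoodList (cs st : List Char) (c : Char) (L : List Int) : Prop :=
  L.Pairwise (· > ·) ∧
  (∀ k ∈ L, 0 ≤ k ∧ k < (cs.length : Int) ∧ PySem.List.pyGetD cs k ' ' = c) ∧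
  (∀ k : Int, 0 ≤ k → k < (cs.length : Int) → PySem.List.pyGetD cs k ' ' = c →
      PySem.List.pyGetD st k '.' = '.' → k ∈ L)

def pvInv (cs st : List Char) (pos : PySem.Dict Char (List Int)) : Prop :=
  st.length = cs.length ∧
  ∀ c ∈ (['A','U','G','C'] : List Char), pvGoodList cs st c (pos.getD c [])

-- index helpers
lemma pvGetD_setD (xs : List Char) (i m : Int) (v d : Char) (h0 : 0 ≤ i) (hm : 0 ≤ m)
    (h : i < (xs.length : Int)) :
    PySem.List.pyGetD (PySem.List.pySetD xs i v) m d = if m = i then v else PySem.List.pyGetD xs m d := by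
  obtain ⟨n, rfl⟩ : ∃ n : Nat, i = (n : Int) := ⟨i.toNat, (Int.toNat_of_nonneg h0).symm⟩
  obtain ⟨mn, rfl⟩ : ∃ mn : Nat, m = (mn : Int) := ⟨m.toNat, (Int.toNat_of_nonneg hm).symm⟩
  have hn : n < xs.length := by exact_mod_cast h
  rw [PySem.List.pyGetD_pySetD_natCast xs n mn v d hn]
  by_cases hmn : mn = n
  · rw [if_pos hmn, if_pos (by exact_mod_cast hmn)]
  · rw [if_neg hmn, if_neg (by exact_mod_cast hmn)]

lemma pvComp_cases (ch c : Char) (h : pvComp.get? ch = some c) :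
    (ch = 'A' ∧ c = 'U') ∨ (ch = 'U' ∧ c = 'A') ∨ (ch = 'G' ∧ c = 'C') ∨ (ch = 'C' ∧ c = 'G') := by
  have hmk : pvComp = PySem.Dict.mk [('A','U'),('U','A'),('G','C'),('C','G')] := by decide
  rw [hmk] at h
  simp only [PySem.Dict.get?_mk_cons] at h
  split_ifs at h with h1 h2 h3 h4
  · exact Or.inl ⟨(beq_iff_eq.mp h1).symm, (Option.some_inj.mp h).symm⟩
  · exact Or.inr (Or.inl ⟨(beq_iff_eq.mp h2).symm, (Option.some_inj.mp h).symm⟩)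
  · exact Or.inr (Or.inr (Or.inl ⟨(beq_iff_eq.mp h3).symm, (Option.some_inj.mp h).symm⟩))
  · exact Or.inr (Or.inr (Or.inr ⟨(beq_iff_eq.mp h4).symm, (Option.some_inj.mp h).symm⟩))
  · simp [PySem.Dict.get?] at h

lemma pvComp_contains (ch c : Char) (h : pvComp.get? ch = some c) :
    pvComp.contains ch = true := by
  rw [PySem.Dict.contains_eq_isSome_get?, h]; rfl

lemma pvComp_getD (ch c : Char) (h : pvComp.get? ch = some c) :
    pvComp.getD ch ' ' = c := by
  rw [PySem.Dict.getD_eq_get?_getD, h]; rfl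

-- pvPop facts
lemma pvPop_subset (st : List Char) (L : List Int) : ∀ k ∈ pvPop st L, k ∈ L := by
  induction L with
  | nil => simp [pvPop]
  | cons j rest ih =>
      intro k hk
      rw [pvPop] at hk
      by_cases hj : (!(PySem.List.pyGetD st j '.' == '.')) = true
      · rw [if_pos hj] at hk; exact List.mem_cons_of_mem _ (ih k hk)
      · rw [if_neg hj] at hk; exact hk

lemma pvPop_pairwise (st : List Char) (L : List Int) (h : L.Pairwise (· > ·)) :
    (pvPop st L).Pairwise (· > ·) := by
  induction L with
  | nil => simp [pvPop]
  | cons j rest ih =>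
      rw [pvPop]
      rcases List.pairwise_cons.mp h with ⟨h1, h2⟩
      by_cases hj : (!(PySem.List.pyGetD st j '.' == '.')) = true
      · rw [if_pos hj]; exact ih h2
      · rw [if_neg hj]; exact h

lemma pvPop_mem (st : List Char) (L : List Int) (k : Int) (hk : k ∈ L)
    (hu : PySem.List.pyGetD st k '.' = '.') : k ∈ pvPop st L := by
  induction L with
  | nil => simp at hk
  | cons j rest ih =>
      rw [pvPop]
      by_cases hj : (!(PySem.List.pyGetD st j '.' == '.')) = true
      · rw [if_pos hj]
        rcases List.mem_cons.mp hk with rfl | hk'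
        · simp [hu] at hj
        · exact ih hk'
      · rw [if_neg hj]; exact hk

lemma pvPop_head (st : List Char) (L : List Int) (j : Int) (rest : List Int)
    (h : pvPop st L = j :: rest) : PySem.List.pyGetD st j '.' = '.' := by
  induction L with
  | nil => simp [pvPop] at h
  | cons j' rest' ih =>
      rw [pvPop] at h
      by_cases hj : (!(PySem.List.pyGetD st j' '.' == '.')) = true
      · rw [if_pos hj] at h; exact ih h
      · rw [if_neg hj] at h
        rcases h with ⟨rfl, rfl⟩
        simpa using hj

-- scan facts
lemma pvScanA_of_paired (cs : List Char) (i : Int) (st : List Char) (js : List Int)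
    (h : ¬ PySem.List.pyGetD st i '.' = '.') : pvScanA cs i st js = st := by
  induction js with
  | nil => rfl
  | cons j js ih =>
      rw [pvScanA]
      rw [if_neg (by simp [h])]
      exact ih

lemma pvScanA_of_none (cs : List Char) (i : Int) (st : List Char) (js : List Int)
    (h : pvComp.get? (PySem.List.pyGetD cs i ' ') = none) : pvScanA cs i st js = st := by
  have hc : pvComp.contains (PySem.List.pyGetD cs i ' ') = false := by
    rw [PySem.Dict.contains_eq_isSome_get?, h]; rfl
  induction js with
  | nil => rfl
  | cons j js ih =>
      rw [pvScanA]
      rw [if_neg (by simp [hc])]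
      exact ih

lemma pvScanA_miss (cs : List Char) (i : Int) (st : List Char) (a b : Int) (c : Char)
    (hc : pvComp.get? (PySem.List.pyGetD cs i ' ') = some c)
    (h : ∀ j : Int, b < j → j ≤ a →
        ¬(PySem.List.pyGetD cs j ' ' = c ∧ PySem.List.pyGetD st j '.' = '.')) :
    pvScanA cs i st (PySem.List.pyRange a b (-1)) = st := by
  have hco := pvComp_contains _ _ hc
  have hgd := pvComp_getD _ _ hc
  generalize hm : (a - b).toNat = m
  induction m generalizing a with
  | zero =>
      have hab : a ≤ b := by omega
      rw [PySem.List.pyRange_neg_one_eq_nil hab]; rfl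
  | succ m ih =>
      have hba : b < a := by omega
      rw [PySem.List.pyRange_neg_one_cons hba, pvScanA]
      have hna : ¬(PySem.List.pyGetD cs a ' ' = c ∧ PySem.List.pyGetD st a '.' = '.') :=
        h a hba le_rfl
      by_cases hca : PySem.List.pyGetD cs a ' ' = c
      · have hsa : ¬ PySem.List.pyGetD st a '.' = '.' := fun hu => hna ⟨hca, hu⟩
        rw [if_neg (by simp [hco, hgd, hca, hsa])]
        exact ih (a - 1) (fun j h1 h2 => h j h1 (by omega)) (by omega)
      · rw [if_neg (by simp [hco, hgd, hca])]
        exact ih (a - 1) (fun j h1 h2 => h j h1 (by omega)) (by omega)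

lemma pvScanA_hit (cs : List Char) (i : Int) (st : List Char) (a b : Int) (c : Char) (j0 : Int)
    (hc : pvComp.get? (PySem.List.pyGetD cs i ' ') = some c)
    (hi : PySem.List.pyGetD st i '.' = '.')
    (hb : b < j0) (ha : j0 ≤ a)
    (hcj : PySem.List.pyGetD cs j0 ' ' = c) (huj : PySem.List.pyGetD st j0 '.' = '.')
    (hmax : ∀ j : Int, j0 < j → j ≤ a →
        ¬(PySem.List.pyGetD cs j ' ' = c ∧ PySem.List.pyGetD st j '.' = '.')) :
    pvScanA cs i st (PySem.List.pyRange a b (-1))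
      = PySem.List.pySetD (PySem.List.pySetD st i '(') j0 ')' := by
  have hco := pvComp_contains _ _ hc
  have hgd := pvComp_getD _ _ hc
  generalize hm : (a - j0).toNat = m
  induction m generalizing a with
  | zero =>
      have haj : a = j0 := by omega
      subst haj
      rw [PySem.List.pyRange_neg_one_cons hb, pvScanA]
      rw [if_pos (by simp [hco, hgd, hcj, hi, huj])]
  | succ m ih =>
      have hja : j0 < a := by omega
      rw [PySem.List.pyRange_neg_one_cons (by omega), pvScanA]
      have hna : ¬(PySem.List.pyGetD cs a ' ' = c ∧ PySem.List.pyGetD st a '.' = '.') :=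
        hmax a hja le_rfl
      by_cases hca : PySem.List.pyGetD cs a ' ' = c
      · have hsa : ¬ PySem.List.pyGetD st a '.' = '.' := fun hu => hna ⟨hca, hu⟩
        rw [if_neg (by simp [hco, hgd, hca, hsa])]
        exact ih (a - 1) (by omega) (fun j h1 h2 => hmax j h1 (by omega)) (by omega)
      · rw [if_neg (by simp [hco, hgd, hca])]
        exact ih (a - 1) (by omega) (fun j h1 h2 => hmax j h1 (by omega)) (by omega)

-- the pos-building fold, characterised
lemma pvBuild_getD (l : List (Int × Char)) (d : PySem.Dict Char (List Int)) (c : Char)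
    (hc : d.contains c = true) :
    (l.foldl (fun d kc => if d.contains kc.2 then d.modify kc.2 [] (fun l => kc.1 :: l) else d) d).getD c []
      = ((l.filter (fun kc => kc.2 == c)).reverse.map (·.1)) ++ d.getD c [] := by
  induction l generalizing d with
  | nil => simp
  | cons kc t ih =>
      obtain ⟨k, x⟩ := kc
      by_cases hxc : x = c
      · subst hxc
        rw [List.foldl_cons]
        rw [if_pos hc]
        rw [ih _ (by rw [PySem.Dict.contains_modify]; simp [hc])]
        rw [PySem.Dict.getD_modify_self]
        simp
      · have hfil : ((k, x) :: t).filter (fun kc => kc.2 == c) = t.filter (fun kc => kc.2 == c) := by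
          simp [hxc]
        rw [List.foldl_cons, hfil]
        by_cases hcx : d.contains x = true
        · rw [if_pos hcx]
          rw [ih _ (by rw [PySem.Dict.contains_modify]; simp [hc])]
          congr 1
          rw [PySem.Dict.getD_modify_of_ne]
          exact fun he => hxc he.symm
        · rw [if_neg hcx]
          exact ih _ hc

lemma pvPos_getD (cs : List Char) (c : Char) (hc : c ∈ (['A','U','G','C'] : List Char)) :
    (pvPos cs).getD c []
      = ((PySem.List.pyRange 0 (cs.length : Int) 1).filter
          (fun j => PySem.List.pyGetD cs j ' ' == c)).reverse := by
  unfold pvPos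
  rw [PySem.List.enumerate_eq_map_pyRange cs ' ']
  have hbase : (PySem.Dict.ofList ([('A',[]),('U',[]),('G',[]),('C',[])] : List (Char × List Int))).contains c = true := by
    fin_cases hc <;> decide
  rw [pvBuild_getD _ _ _ hbase]
  have hempty : (PySem.Dict.ofList ([('A',[]),('U',[]),('G',[]),('C',[])] : List (Char × List Int))).getD c [] = [] := by
    fin_cases hc <;> decide
  rw [hempty, List.append_nil, List.filter_map]
  simp [List.map_map, Function.comp_def, PySem.List.len_eq]

lemma pvPos_good (cs : List Char) : ∀ c ∈ (['A','U','G','C'] : List Char),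
    pvGoodList cs (List.replicate cs.length '.') c ((pvPos cs).getD c []) := by
  intro c hc
  rw [pvPos_getD cs c hc]
  refine ⟨?_, ?_, ?_⟩
  · rw [List.pairwise_reverse]
    exact List.Pairwise.filter _ (PySem.List.pairwise_lt_pyRange_one 0 (cs.length : Int))
  · intro k hk
    rw [List.mem_reverse, List.mem_filter] at hk
    obtain ⟨hk1, hk2⟩ := hk
    rw [PySem.List.mem_pyRange_one] at hk1
    exact ⟨hk1.1, hk1.2, by simpa using hk2⟩
  · intro k h0 hn hck _
    rw [List.mem_reverse, List.mem_filter, PySem.List.mem_pyRange_one]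
    exact ⟨⟨h0, hn⟩, by simp [hck]⟩

-- one step preserves the relation
lemma pvStep_eq (cs st : List Char) (pos : PySem.Dict Char (List Int)) (i : Int)
    (h0 : 0 ≤ i) (hI : pvInv cs st pos) :
    pvStepA cs st i = (pvStepB cs (st, pos) i).1 ∧
    pvInv cs (pvStepB cs (st, pos) i).1 (pvStepB cs (st, pos) i).2 := by
  obtain ⟨hlen, hpos⟩ := hI
  unfold pvStepA pvStepB
  dsimp only
  by_cases hn : i + 3 + 1 < (cs.length : Int)
  case neg =>
    rw [if_neg hn, if_pos (by omega)]
    exact ⟨rfl, hlen, hpos⟩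
  rw [if_pos hn, if_neg (by omega)]
  by_cases hsti : PySem.List.pyGetD st i '.' = '.'
  case neg =>
    rw [pvScanA_of_paired _ _ _ _ hsti]
    rw [if_pos (by simp [hsti])]
    exact ⟨rfl, hlen, hpos⟩
  rw [if_neg (by simp [hsti])]
  cases hget : pvComp.get? (PySem.List.pyGetD cs i ' ') with
  | none =>
      rw [pvScanA_of_none _ _ _ _ hget]
      exact ⟨rfl, hlen, hpos⟩
  | some c =>
    dsimp only
    have hcbase : c ∈ (['A','U','G','C'] : List Char) := by
      rcases pvComp_cases _ _ hget with ⟨_, rfl⟩ | ⟨_, rfl⟩ | ⟨_, rfl⟩ | ⟨_, rfl⟩ <;> simp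
    obtain ⟨hPW, hElems, hAll⟩ := hpos c hcbase
    cases hL' : pvPop st (pos.getD c []) with
    | nil =>
        dsimp only
        have hnone : ∀ j : Int, i + 3 < j → j ≤ (cs.length : Int) - 1 →
            ¬(PySem.List.pyGetD cs j ' ' = c ∧ PySem.List.pyGetD st j '.' = '.') := by
          rintro j h1 h2 ⟨hcj, huj⟩
          have hm : j ∈ pvPop st (pos.getD c []) :=
            pvPop_mem _ _ _ (hAll j (by omega) (by omega) hcj huj) huj
          rw [hL'] at hm
          simp at hm
        rw [pvScanA_miss _ _ _ _ _ _ hget hnone]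
        refine ⟨rfl, hlen, ?_⟩
        intro c' hc'
        by_cases hcc : c' = c
        · subst hcc
          rw [PySem.Dict.getD_insert_self]
          refine ⟨List.Pairwise.nil, by simp, ?_⟩
          intro k hk0 hkn hck huk
          have hm : k ∈ pvPop st (pos.getD c' []) :=
            pvPop_mem _ _ _ (hAll k hk0 hkn hck huk) huk
          rw [hL'] at hm
          simp at hm
        · rw [PySem.Dict.getD_insert_of_ne _ _ _ hcc]
          exact hpos c' hc'
    | cons j0 rest =>
        dsimp only
        have hpwL : (pvPop st (pos.getD c [])).Pairwise (· > ·) := pvPop_pairwise _ _ hPW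
        rw [hL'] at hpwL
        have hj0L : j0 ∈ pos.getD c [] :=
          pvPop_subset _ _ _ (by rw [hL']; exact List.mem_cons_self)
        obtain ⟨hj00, hj0n, hj0c⟩ := hElems j0 hj0L
        have hj0u : PySem.List.pyGetD st j0 '.' = '.' := pvPop_head _ _ _ _ hL'
        have hmax : ∀ k : Int, 0 ≤ k → k < (cs.length : Int) →
            PySem.List.pyGetD cs k ' ' = c → PySem.List.pyGetD st k '.' = '.' → k ≤ j0 := by
          intro k hk0 hkn hck huk
          have hm : k ∈ pvPop st (pos.getD c []) :=
            pvPop_mem _ _ _ (hAll k hk0 hkn hck huk) huk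
          rw [hL'] at hm
          rcases List.mem_cons.mp hm with rfl | hk'
          · exact le_rfl
          · exact le_of_lt ((List.pairwise_cons.mp hpwL).1 k hk')
        by_cases hj0i : j0 > i + 3
        · rw [if_pos hj0i]
          rw [pvScanA_hit cs i st ((cs.length : Int) - 1) (i + 3) c j0 hget hsti
                (by omega) (by omega) hj0c hj0u
                (fun j h1 h2 hP => absurd (hmax j (by omega) (by omega) hP.1 hP.2) (by omega))]
          have hsl : st.length = cs.length := hlen
          have hst1len : (PySem.List.pySetD st i '(').length = st.length :=
            PySem.List.length_pySetD st i '('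
          have hget2 : ∀ m : Int, 0 ≤ m →
              PySem.List.pyGetD (PySem.List.pySetD (PySem.List.pySetD st i '(') j0 ')') m '.'
                = if m = j0 then ')' else if m = i then '(' else PySem.List.pyGetD st m '.' := by
            intro m hm0
            rw [pvGetD_setD _ _ _ _ _ hj00 hm0 (by rw [hst1len, hsl]; omega)]
            by_cases hmj : m = j0
            · rw [if_pos hmj, if_pos hmj]
            · rw [if_neg hmj, if_neg hmj]
              rw [pvGetD_setD _ _ _ _ _ h0 hm0 (by rw [hsl]; omega)]
          refine ⟨rfl, ?_, ?_⟩
          · rw [PySem.List.length_pySetD, hst1len, hsl]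
          · intro c' hc'
            by_cases hcc : c' = c
            · subst hcc
              rw [PySem.Dict.getD_insert_self]
              refine ⟨(List.pairwise_cons.mp hpwL).2, ?_, ?_⟩
              · intro k hk
                exact hElems k (pvPop_subset _ _ _ (by rw [hL']; exact List.mem_cons_of_mem _ hk))
              · intro k hk0 hkn hck huk
                rw [hget2 k hk0] at huk
                by_cases hkj : k = j0
                · rw [if_pos hkj] at huk; simp at huk
                · rw [if_neg hkj] at huk
                  by_cases hki : k = i
                  · rw [if_pos hki] at huk; simp at huk
                  · rw [if_neg hki] at huk
                    have hm : k ∈ pvPop st (pos.getD c' []) :=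
                      pvPop_mem _ _ _ (hAll k hk0 hkn hck huk) huk
                    rw [hL'] at hm
                    rcases List.mem_cons.mp hm with rfl | hk'
                    · exact absurd rfl hkj
                    · exact hk'
            · rw [PySem.Dict.getD_insert_of_ne _ _ _ hcc]
              obtain ⟨hPW', hElems', hAll'⟩ := hpos c' hc'
              refine ⟨hPW', hElems', ?_⟩
              intro k hk0 hkn hck huk
              rw [hget2 k hk0] at huk
              by_cases hkj : k = j0
              · rw [if_pos hkj] at huk; simp at huk
              · rw [if_neg hkj] at huk
                by_cases hki : k = i
                · rw [if_pos hki] at huk; simp at huk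
                · rw [if_neg hki] at huk
                  exact hAll' k hk0 hkn hck huk
        · rw [if_neg hj0i]
          have hnone : ∀ j : Int, i + 3 < j → j ≤ (cs.length : Int) - 1 →
              ¬(PySem.List.pyGetD cs j ' ' = c ∧ PySem.List.pyGetD st j '.' = '.') := by
            rintro j h1 h2 ⟨hcj, huj⟩
            exact absurd (hmax j (by omega) (by omega) hcj huj) (by omega)
          rw [pvScanA_miss _ _ _ _ _ _ hget hnone]
          refine ⟨rfl, hlen, ?_⟩
          intro c' hc'
          by_cases hcc : c' = c
          · subst hcc
            rw [PySem.Dict.getD_insert_self]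
            refine ⟨hpwL, ?_, ?_⟩
            · intro k hk
              exact hElems k (pvPop_subset _ _ _ (by rw [hL']; exact hk))
            · intro k hk0 hkn hck huk
              have hm : k ∈ pvPop st (pos.getD c' []) :=
                pvPop_mem _ _ _ (hAll k hk0 hkn hck huk) huk
              rw [hL'] at hm
              exact hm
          · rw [PySem.Dict.getD_insert_of_ne _ _ _ hcc]
            exact hpos c' hc'

lemma pvFold_eq (cs : List Char) (m : Nat) : ∀ (i : Int) (st : List Char)
    (pos : PySem.Dict Char (List Int)), 0 ≤ i → ((cs.length : Int) - i).toNat = m →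
    pvInv cs st pos →
    (PySem.List.pyRange i (cs.length : Int) 1).foldl (pvStepA cs) st
      = ((PySem.List.pyRange i (cs.length : Int) 1).foldl (pvStepB cs) (st, pos)).1 := by
  induction m with
  | zero =>
      intro i st pos h0 hm _
      rw [PySem.List.pyRange_one_eq_nil (by omega)]
      rfl
  | succ m ih =>
      intro i st pos h0 hm hI
      have hin : i < (cs.length : Int) := by omega
      rw [PySem.List.pyRange_one_cons hin]
      rw [List.foldl_cons, List.foldl_cons]
      obtain ⟨heq, hI'⟩ := pvStep_eq cs st pos i h0 hI
      rw [heq]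
      have := ih (i + 1) (pvStepB cs (st, pos) i).1 (pvStepB cs (st, pos) i).2
        (by omega) (by omega) hI'
      simpa using this

-- ===== VERDICT (by name: the statement is the Claim_ definition above) =====
set_option maxHeartbeats 1000000 in
theorem simple_structure_prediction_py_spec : Claim_equal_simple_structure_prediction_py := by
  intro sequence _
  show simple_structure_prediction_py sequence = simple_structure_prediction_py_alt sequence
  unfold simple_structure_prediction_py simple_structure_prediction_py_alt
  exact congrArg String.mk (pvFold_eq _ _ 0 _ _ le_rfl rfl ⟨by simp, pvPos_good _⟩)
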